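-- pv_equiv track=rewrite | github.com/lastCoyotes/AOC2025 | AOC12a.py | place_shape
-- ===== SOURCE A (Python) =====
-- def place_shape(matrix, shape, position):
--     # places the given shape at the specified position in the matrix
--
--     # returns matrix with the new shape places, if placement isnt possible, returns None
--
--     new_matrix = [row.copy() for row in matrix]
--
--     for cell in shape:
--         row, col = cell
--         new_row = position[0] + row
--         new_col = position[1] + col
--
--         #check boundaries
--         if new_row < 0 or new_row >= len(matrix) or new_col < 0 or new_col >= len(matrix[0]):
--             return None
--
--         new_matrix[new_row][new_col] += 1
--
--         # check for overlap
--         if new_matrix[new_row][new_col] > 1: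
--             return None
--
--     return new_matrix
-- ===== SOURCE B (Python) =====
-- def place_shape(matrix, shape, position):
--     # validate-then-construct: collect all target cells (bounds-checked),
--     # reject any overlap using total multiplicities, then stamp a fresh copy
--     rows = len(matrix)
--     cols = len(matrix[0]) if matrix else 0
--     targets = []
--     for r, c in shape:
--         nr, nc = position[0] + r, position[1] + c
--         if not (0 <= nr < rows and 0 <= nc < cols):
--             return None
--         targets.append((nr, nc))
--     for nr, nc in targets:
--         if matrix[nr][nc] + targets.count((nr, nc)) > 1:
--             return None
--     result = [row.copy() for row in matrix]
--     for nr, nc in targets: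
--         result[nr][nc] += 1
--     return result
-- ===== Notes on version B (the rewrite author's own statement) =====
-- stated objective: alternative
-- what changed: Replaced A's single interleaved stamp-and-check loop (mutating the copy and testing after each increment) by a three-phase validate-then-construct decomposition: first collect all bounds-checked target cells, then reject overlaps by comparing each original value plus the target's total multiplicity, and only then stamp a fresh copy.
-- outside the precondition, e.g. on place_shape([[0, 0], [0]], [(0, 5), (1, 1)], (0, 0)): A returns None, B returns None
import Mathlib
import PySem

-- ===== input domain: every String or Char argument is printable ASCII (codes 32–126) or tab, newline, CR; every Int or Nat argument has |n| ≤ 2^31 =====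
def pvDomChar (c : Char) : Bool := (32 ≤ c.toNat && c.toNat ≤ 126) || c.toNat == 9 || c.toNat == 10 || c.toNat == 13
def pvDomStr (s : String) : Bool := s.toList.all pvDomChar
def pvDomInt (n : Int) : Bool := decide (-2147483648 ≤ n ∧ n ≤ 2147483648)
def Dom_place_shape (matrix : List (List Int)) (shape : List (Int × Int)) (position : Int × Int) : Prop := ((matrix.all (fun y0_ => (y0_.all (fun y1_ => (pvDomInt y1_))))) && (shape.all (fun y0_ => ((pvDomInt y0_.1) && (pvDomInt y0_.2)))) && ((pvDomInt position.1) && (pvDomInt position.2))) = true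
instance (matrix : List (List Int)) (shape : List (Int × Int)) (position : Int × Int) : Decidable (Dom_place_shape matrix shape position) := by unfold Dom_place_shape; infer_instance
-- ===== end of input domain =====

-- B replaces A's interleaved stamp-and-check loop by a validate-then-construct decomposition
-- (collect bounds-checked targets, reject overlaps via total multiplicities, then stamp a copy);
-- equivalence is about the return value (neither program mutates its arguments observably).

-- ===== PORT A =====
-- the loop of A: walks the shape, stamping the working matrix cell by cell and
-- checking after each increment ('new_matrix[new_row][new_col] += 1' then '> 1')
def place_shape_go (matrix : List (List Int)) (position : Int × Int) :
    List (Int × Int) → List (List Int) → Option (List (List Int))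
  | [], m => some m
  | (row, col) :: rest, m =>
    let new_row := position.1 + row
    let new_col := position.2 + col
    -- check boundaries ('len(matrix[0])' is guarded by 'new_row >= len(matrix)' when matrix = [])
    if new_row < 0 ∨ (matrix.length : Int) ≤ new_row ∨ new_col < 0 ∨ ((matrix.headD []).length : Int) ≤ new_col then
      none
    else
      let m' := m.modify new_row.toNat (fun r => r.modify new_col.toNat (· + 1))
      -- check for overlap (read back the just-incremented cell)
      if ((m'.getD new_row.toNat []).getD new_col.toNat 0) > 1 then none
      else place_shape_go matrix position rest m'

def place_shape (matrix : List (List Int)) (shape : List (Int × Int)) (position : Int × Int) :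
    Option (List (List Int)) :=
  -- 'new_matrix = [row.copy() for row in matrix]' — a copy is the identity on immutable lists
  let new_matrix := matrix.map (fun row => row)
  place_shape_go matrix position shape new_matrix

-- ===== PORT B =====
-- phase 1 of Source B: absolute target of every shape cell, None on any bounds failure
def bTargets (position : Int × Int) (rows cols : Int) : List (Int × Int) → Option (List (Int × Int))
  | [] => some []
  | (r, c) :: rest =>
    let nr := position.1 + r
    let nc := position.2 + c
    if 0 ≤ nr ∧ nr < rows ∧ 0 ≤ nc ∧ nc < cols then
      (bTargets position rows cols rest).map (fun ts => (nr, nc) :: ts)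
    else none

-- 'matrix[nr][nc]' for a known-in-bounds target
def bVal (matrix : List (List Int)) (t : Int × Int) : Int :=
  (matrix.getD t.1.toNat []).getD t.2.toNat 0

-- 'result[nr][nc] += 1'
def bStamp (m : List (List Int)) (t : Int × Int) : List (List Int) :=
  m.modify t.1.toNat (fun r => r.modify t.2.toNat (· + 1))

def place_shape_alt (matrix : List (List Int)) (shape : List (Int × Int)) (position : Int × Int) :
    Option (List (List Int)) :=
  -- rows = len(matrix); cols = len(matrix[0]) if matrix else 0
  match bTargets position (matrix.length : Int) ((matrix.headD []).length : Int) shape with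
  | none => none
  | some ts =>
    -- phase 2: overlap test against original values plus total multiplicities
    if ts.any (fun t => bVal matrix t + ts.count t > 1) then none
    -- phase 3: stamp a fresh copy
    else some (ts.foldl bStamp matrix)

-- ===== PRECONDITION & SPEC =====
-- Pre_ excludes inputs where some shape cell's target passes A's bounds check (done against
-- row 0's length) yet indexes past the end of its own, shorter row: on such ragged matrices
-- A can raise IndexError when that cell is reached.
def Pre_place_shape (matrix : List (List Int)) (shape : List (Int × Int)) (position : Int × Int) : Prop :=
  ∀ rc ∈ shape,
    (0 ≤ position.1 + rc.1 ∧ position.1 + rc.1 < (matrix.length : Int) ∧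
     0 ≤ position.2 + rc.2 ∧ position.2 + rc.2 < ((matrix.headD []).length : Int)) →
    position.2 + rc.2 < ((matrix.getD (position.1 + rc.1).toNat []).length : Int)
instance (matrix : List (List Int)) (shape : List (Int × Int)) (position : Int × Int) : Decidable (Pre_place_shape matrix shape position) := by unfold Pre_place_shape; infer_instance

def pvWitness_place_shape : List (List Int) × (List (Int × Int)) × (Int × Int) :=
  ([[0, 0], [0, 0]], [(0, 0), (1, 1)], (0, 0))

def Spec_place_shape (matrix : List (List Int)) (shape : List (Int × Int)) (position : Int × Int) (out : Option (List (List Int))) : Prop := out = place_shape_alt matrix shape position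
instance (matrix : List (List Int)) (shape : List (Int × Int)) (position : Int × Int) (out : Option (List (List Int))) : Decidable (Spec_place_shape matrix shape position out) := by unfold Spec_place_shape; infer_instance

-- ===== CLAIM (what is proved, stated in full; the proofs are below) =====
def Claim_equal_place_shape : Prop := ∀ (matrix : List (List Int)) (shape : List (Int × Int)) (position : Int × Int), Dom_place_shape matrix shape position → Pre_place_shape matrix shape position → Spec_place_shape matrix shape position (place_shape matrix shape position)

-- ===== LEMMAS AND PROOFS =====

-- a target with valid indices into the actual (possibly ragged) matrix
def OkT (matrix : List (List Int)) (t : Int × Int) : Prop :=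
  0 ≤ t.1 ∧ t.1 < (matrix.length : Int) ∧ 0 ≤ t.2 ∧
    t.2 < ((matrix.getD t.1.toNat []).length : Int)

-- a target inside A's bounds check (rows, and row 0's columns)
def InB (matrix : List (List Int)) (t : Int × Int) : Prop :=
  0 ≤ t.1 ∧ t.1 < (matrix.length : Int) ∧ 0 ≤ t.2 ∧ t.2 < ((matrix.headD []).length : Int)

def SameShape (m m' : List (List Int)) : Prop :=
  m.length = m'.length ∧ ∀ i : Nat, (m.getD i []).length = (m'.getD i []).length

lemma bStamp_length (m : List (List Int)) (u : Int × Int) : (bStamp m u).length = m.length := by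
  simp [bStamp]

lemma bStamp_row_len (m : List (List Int)) (u : Int × Int) (i : Nat) :
    ((bStamp m u).getD i []).length = (m.getD i []).length := by
  simp [bStamp, List.getD_eq_getElem?_getD, List.getElem?_modify]
  cases m[i]? with
  | none => simp
  | some r => by_cases h : u.1.toNat = i <;> simp [h]

lemma sameShape_bStamp {matrix m : List (List Int)} (h : SameShape matrix m) (u : Int × Int) :
    SameShape matrix (bStamp m u) := by
  obtain ⟨h1, h2⟩ := h
  exact ⟨by rw [bStamp_length]; exact h1, fun i => by rw [bStamp_row_len]; exact h2 i⟩

lemma okT_of_sameShape {matrix m : List (List Int)} (h : SameShape matrix m) {t : Int × Int}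
    (ht : OkT matrix t) : OkT m t := by
  obtain ⟨h1, h2⟩ := h
  refine ⟨ht.1, by rw [← h1]; exact ht.2.1, ht.2.2.1, by rw [← h2]; exact ht.2.2.2⟩

lemma getD_modify_self {α : Type} (l : List α) (i : Nat) (f : α → α) (d : α)
    (h : i < l.length) : (l.modify i f).getD i d = f (l.getD i d) := by
  simp [List.getD_eq_getElem?_getD, List.getElem?_modify_eq, List.getElem?_eq_getElem h]

lemma bVal_bStamp_self {m : List (List Int)} {t : Int × Int} (h : OkT m t) :
    bVal (bStamp m t) t = bVal m t + 1 := by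
  obtain ⟨h1, h2, h3, h4⟩ := h
  have hi : t.1.toNat < m.length := by omega
  have hj : t.2.toNat < (m.getD t.1.toNat []).length := by omega
  unfold bVal bStamp
  rw [getD_modify_self _ _ _ _ hi, getD_modify_self _ _ _ _ hj]

lemma bVal_bStamp_other {m : List (List Int)} {t u : Int × Int}
    (ht1 : 0 ≤ t.1) (ht2 : 0 ≤ t.2) (hu1 : 0 ≤ u.1) (hu2 : 0 ≤ u.2) (hne : t ≠ u) :
    bVal (bStamp m u) t = bVal m t := by
  by_cases hrow : u.1.toNat = t.1.toNat
  · have hr : u.1 = t.1 := by omega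
    have hcol : u.2.toNat ≠ t.2.toNat := by
      intro hc
      exact hne (Prod.ext hr.symm (by omega))
    simp [bVal, bStamp, List.getD_eq_getElem?_getD, hrow]
    cases m[t.1.toNat]? with
    | none => simp
    | some r => simp [hcol]
  · simp [bVal, bStamp, List.getD_eq_getElem?_getD, hrow]

lemma bVal_stampAll (matrix : List (List Int)) :
    ∀ (ts : List (Int × Int)) (m : List (List Int)) (t : Int × Int),
      SameShape matrix m →
      (∀ u ∈ ts, OkT matrix u) → 0 ≤ t.1 → 0 ≤ t.2 →
      bVal (ts.foldl bStamp m) t = bVal m t + ts.count t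
  | [], m, t, _, _, _, _ => by simp
  | u :: ts, m, t, hs, hok, ht1, ht2 => by
    have hu := hok u (by simp)
    have hrec := bVal_stampAll matrix ts (bStamp m u) t (sameShape_bStamp hs u)
      (fun v hv => hok v (by simp [hv])) ht1 ht2
    by_cases he : u = t
    · subst he
      rw [List.foldl_cons, hrec, bVal_bStamp_self (okT_of_sameShape hs hu)]
      simp
      ring
    · rw [List.foldl_cons, hrec, bVal_bStamp_other ht1 ht2 hu.1 hu.2.2.1 (Ne.symm he)]
      simp [he]

-- the loop of A, started on the matrix with the targets ts already stamped in,
-- computes exactly B's validate-then-construct answer for the remaining cells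
lemma main_invariant (matrix : List (List Int)) (position : Int × Int) :
    ∀ (rest ts : List (Int × Int)),
      (∀ u ∈ ts, OkT matrix u) →
      (∀ u ∈ ts, bVal matrix u + ts.count u ≤ 1) →
      (∀ rc ∈ rest, InB matrix (position.1 + rc.1, position.2 + rc.2) →
        OkT matrix (position.1 + rc.1, position.2 + rc.2)) →
      place_shape_go matrix position rest (ts.foldl bStamp matrix) =
        (match bTargets position (matrix.length : Int) ((matrix.headD []).length : Int) rest with
         | none => none
         | some ts' =>
           if (ts ++ ts').any (fun t => bVal matrix t + (ts ++ ts').count t > 1) then none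
           else some ((ts ++ ts').foldl bStamp matrix))
  | [], ts, hok, hle, _ => by
    simp only [place_shape_go, bTargets, List.append_nil]
    rw [if_neg]
    simp only [List.any_eq_true, not_exists]
    intro t
    simp only [decide_eq_true_eq, not_and]
    intro hmem
    have := hle t hmem
    omega
  | (r, c) :: rest, ts, hok, hle, hpre => by
    have hpre' : ∀ rc ∈ rest, InB matrix (position.1 + rc.1, position.2 + rc.2) →
        OkT matrix (position.1 + rc.1, position.2 + rc.2) :=
      fun rc h => hpre rc (by simp [h])
    set t : Int × Int := (position.1 + r, position.2 + c) with htdef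
    by_cases hin : InB matrix t
    · obtain ⟨hb1, hb2, hb3, hb4⟩ := hin
      have hokt : OkT matrix t := hpre (r, c) (by simp) ⟨hb1, hb2, hb3, hb4⟩
      have hstep : place_shape_go matrix position ((r, c) :: rest) (ts.foldl bStamp matrix) =
          (if bVal ((ts ++ [t]).foldl bStamp matrix) t > 1 then none
           else place_shape_go matrix position rest ((ts ++ [t]).foldl bStamp matrix)) := by
        simp only [place_shape_go, List.foldl_append, List.foldl_cons, List.foldl_nil]
        rw [if_neg (by simp only [not_or, not_lt, not_le]; exact ⟨hb1, by omega, hb3, by omega⟩)]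
        rfl
      have hok' : ∀ u ∈ ts ++ [t], OkT matrix u := by
        intro u hu
        rcases List.mem_append.1 hu with h | h
        · exact hok u h
        · simp at h; subst h; exact hokt
      have hv : bVal ((ts ++ [t]).foldl bStamp matrix) t =
          bVal matrix t + (ts.count t + 1) := by
        rw [bVal_stampAll matrix (ts ++ [t]) matrix t ⟨rfl, fun _ => rfl⟩ hok' hb1 hb3]
        simp
      have hguard : bTargets position (matrix.length : Int) ((matrix.headD []).length : Int)
          ((r, c) :: rest) =
          (bTargets position (matrix.length : Int) ((matrix.headD []).length : Int) rest).map
            (fun ts' => t :: ts') := by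
        simp only [bTargets]
        rw [if_pos ⟨hb1, hb2, hb3, hb4⟩]
      rw [hstep, hguard]
      by_cases hbig : bVal matrix t + (ts.count t + 1) > 1
      · rw [if_pos (by rw [hv]; exact hbig)]
        cases hts' : bTargets position (matrix.length : Int) ((matrix.headD []).length : Int) rest with
        | none => simp
        | some ts'' =>
          simp only [Option.map_some]
          rw [if_pos]
          simp only [List.any_eq_true]
          refine ⟨t, by simp, ?_⟩
          simp only [decide_eq_true_eq]
          have hc : (ts ++ t :: ts'').count t ≥ ts.count t + 1 := by
            simp [List.count_append]
          omega
      · rw [if_neg (by rw [hv]; exact hbig)]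
        have hle' : ∀ u ∈ ts ++ [t], bVal matrix u + (ts ++ [t]).count u ≤ 1 := by
          intro u hu
          by_cases he : u = t
          · subst he
            simp only [List.count_append, List.count_cons, List.count_nil]
            simp
            omega
          · have hu' : u ∈ ts := by
              rcases List.mem_append.1 hu with h | h
              · exact h
              · simp at h; exact absurd h he
            have := hle u hu'
            have hz : List.count u [t] = 0 := by
              rw [List.count_eq_zero]; simp [he]
            simp only [List.count_append, hz]
            omega
        have hrec := main_invariant matrix position rest (ts ++ [t]) hok' hle' hpre'
        rw [hrec]
        cases hts' : bTargets position (matrix.length : Int) ((matrix.headD []).length : Int) rest with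
        | none => simp
        | some ts'' =>
          simp only [Option.map_some,
            show ts ++ [t] ++ ts'' = ts ++ t :: ts'' from by simp]
    · -- bounds failure: A returns None, B's target collection returns None
      have hcond : position.1 + r < 0 ∨ (matrix.length : Int) ≤ position.1 + r ∨
          position.2 + c < 0 ∨ ((matrix.headD []).length : Int) ≤ position.2 + c := by
        by_contra hcon
        simp only [not_or, not_lt, not_le] at hcon
        exact hin ⟨hcon.1, hcon.2.1, hcon.2.2.1, hcon.2.2.2⟩
      have hgo : place_shape_go matrix position ((r, c) :: rest) (ts.foldl bStamp matrix) = none := by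
        simp only [place_shape_go]
        rw [if_pos hcond]
      have hb : bTargets position (matrix.length : Int) ((matrix.headD []).length : Int)
          ((r, c) :: rest) = none := by
        simp only [bTargets]
        rw [if_neg]
        intro ⟨h1, h2, h3, h4⟩
        exact hin ⟨h1, h2, h3, h4⟩
      rw [hgo, hb]

-- ===== VERDICT (by name: the statement is the Claim_ definition above) =====
theorem place_shape_spec : Claim_equal_place_shape := by
  intro matrix shape position _ hpre
  unfold Spec_place_shape place_shape place_shape_alt
  have h := main_invariant matrix position shape [] (by simp) (by simp)
    (by
      intro rc hrc hin
      obtain ⟨h1, h2, h3, h4⟩ := hin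
      exact ⟨h1, h2, h3, hpre rc hrc ⟨h1, h2, h3, h4⟩⟩)
  simp only [List.foldl_nil, List.nil_append] at h
  simpa using h
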